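-- pv_equiv track=rewrite | github.com/bosl95/Algorithm | SW_Expert_Academy/[3459]승자 예측하기/[3459]승자 예측하기.py | solution
-- ===== SOURCE A (Python) =====
-- def solution(N):
--     turn = True
--     players = ['Alice', 'Bob']
--
--     if N==1:
--         return players[int(turn)]
--     N -= 1
--     i = 1
--     turn = not turn
--
--     while True:
--         for _ in range(2):
--             N -= (4**i)
--             if N <= 0:
--                 return players[int(turn)]
--             turn = not turn
--         i += 1
-- ===== SOURCE B (Python) =====
-- def solution(N):
--     # Closed form: after the N==1 special case, amounts 4,4,16,16,64,64,... are
--     # subtracted; the cumulative sum after 2m steps is 8*(4**m-1)//3, so the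
--     # level m is located directly from bit_length instead of looping.
--     if N == 1:
--         return 'Bob'
--     M = N - 1
--     if M <= 0:
--         return 'Alice'
--     x = (3 * M + 15) // 8          # smallest power 4**m with 8*(4**m-1)//3 >= M has 4**m >= x
--     m = ((x - 1).bit_length() + 1) // 2
--     if 8 * (4 ** (m - 1) - 1) // 3 + 4 ** m >= M:
--         return 'Alice'
--     return 'Bob'
-- ===== Notes on version B (the rewrite author's own statement) =====
-- stated objective: alternative
-- what changed: Replaced the subtract-4^i-twice-and-toggle loop by a closed form: the level m is located directly with bit_length on a ceiling division, then one threshold comparison picks Alice or Bob.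
import Mathlib
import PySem

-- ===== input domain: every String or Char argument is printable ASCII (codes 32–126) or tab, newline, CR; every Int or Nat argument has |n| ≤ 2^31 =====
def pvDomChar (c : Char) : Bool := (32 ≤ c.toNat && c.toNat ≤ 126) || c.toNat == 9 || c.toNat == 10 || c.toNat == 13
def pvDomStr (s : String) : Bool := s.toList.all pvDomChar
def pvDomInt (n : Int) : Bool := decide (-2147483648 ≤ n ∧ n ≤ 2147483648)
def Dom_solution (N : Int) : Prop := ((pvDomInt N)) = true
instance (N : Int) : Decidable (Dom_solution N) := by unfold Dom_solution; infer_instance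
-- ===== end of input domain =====

-- B replaces A's subtract-and-toggle loop by a closed form locating the level via bit_length; proved equal for all N (objective: alternative algorithm).


-- ===== PORT A =====
-- players[int(turn)]
def playersGet (turn : Bool) : String := ["Alice", "Bob"].getD (if turn then 1 else 0) ""

-- the 'while True' loop with the inner 'for _ in range(2)' unrolled into its two steps
def loopA (N : Int) (i : Nat) (turn : Bool) : String :=
  let N1 := N - 4 ^ i
  if _h1 : N1 ≤ 0 then playersGet turn
  else
    let turn1 := !turn
    let N2 := N1 - 4 ^ i
    if _h2 : N2 ≤ 0 then playersGet turn1
    else loopA N2 (i + 1) (!turn1)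
termination_by N.toNat
decreasing_by
  have h4 : (1 : Int) ≤ 4 ^ i := one_le_pow₀ (by norm_num)
  simp only [N1, N2] at *; omega

def solution (N : Int) : String :=
  if N = 1 then playersGet true
  else loopA (N - 1) 1 (!true)

-- ===== PORT B =====
def solution_alt (N : Int) : String :=
  if N = 1 then "Bob"
  else
    let M := N - 1
    if M ≤ 0 then "Alice"
    else
      let x := PySem.Int.floordiv (3 * M + 15) 8
      let m := (PySem.Int.bitLength (x - 1) + 1) / 2
      if PySem.Int.floordiv (8 * (4 ^ (m - 1) - 1)) 3 + 4 ^ m ≥ M then "Alice" else "Bob"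

-- ===== PRECONDITION & SPEC =====
def Spec_solution (N : Int) (out : String) : Prop := out = solution_alt N
instance (N : Int) (out : String) : Decidable (Spec_solution N out) := by unfold Spec_solution; infer_instance

-- ===== CLAIM (what is proved, stated in full; the proofs are below) =====
def Claim_equal_solution : Prop := ∀ (N : Int), Dom_solution N → Spec_solution N (solution N)

-- ===== LEMMAS AND PROOFS =====

-- cumulative amount subtracted after the first m levels (2m steps): 4+4+16+16+...
def Scum : Nat → Int
  | 0 => 0
  | k + 1 => Scum k + 2 * 4 ^ (k + 1)

lemma three_Scum (k : Nat) : 3 * Scum k = 8 * 4 ^ k - 8 := by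
  induction k with
  | zero => simp [Scum]
  | succ k ih => simp only [Scum]; ring_nf; ring_nf at ih; omega

lemma Scum_pos_step (k : Nat) : (0 : Int) < 2 * 4 ^ (k + 1) := by positivity

lemma loopA_skip (k : Nat) (M : Int) (h : Scum k < M) :
    loopA M 1 false = loopA (M - Scum k) (k + 1) false := by
  induction k generalizing M with
  | zero => simp [Scum]
  | succ k ih =>
    have hstep := Scum_pos_step k
    have hk : Scum k < M := by simp only [Scum] at h; omega
    rw [ih M hk]
    rw [loopA]
    have h4 : (0 : Int) < 4 ^ (k + 1) := by positivity
    have hgt : ¬ (M - Scum k - 4 ^ (k + 1) ≤ 0) := by simp only [Scum] at h; omega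
    have hgt2 : ¬ (M - Scum k - 4 ^ (k + 1) - 4 ^ (k + 1) ≤ 0) := by
      simp only [Scum] at h; omega
    simp only [hgt, hgt2, dite_false, Bool.not_false]
    congr 1
    simp only [Scum]; ring

lemma loopA_base (i : Nat) (M : Int) (_h0 : 0 < M) (h2 : M ≤ 2 * 4 ^ i) :
    loopA M i false = if M ≤ 4 ^ i then "Alice" else "Bob" := by
  rw [loopA]
  by_cases h : M ≤ 4 ^ i
  · simp [h, playersGet, show M - 4 ^ i ≤ 0 by omega]
  · have h1 : ¬ (M - 4 ^ i ≤ 0) := by omega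
    have hb : M - 4 ^ i - 4 ^ i ≤ 0 := by omega
    simp [h, h1, hb, playersGet]

lemma le_Scum_self (k : Nat) : (k : Int) ≤ Scum k := by
  induction k with
  | zero => simp [Scum]
  | succ k ih =>
    have := Scum_pos_step k
    have h1 : (1 : Int) ≤ 4 ^ (k + 1) := one_le_pow₀ (by norm_num)
    simp only [Scum]; push_cast; omega

lemma Scum_exists (k : Nat) (M : Int) (h0 : 0 < M) (hk : M ≤ Scum k) :
    ∃ m, 1 ≤ m ∧ Scum (m - 1) < M ∧ M ≤ Scum m := by
  induction k with
  | zero => simp [Scum] at hk; omega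
  | succ k ih =>
    by_cases h : M ≤ Scum k
    · exact ih h
    · exact ⟨k + 1, by omega, by simpa using not_le.mp h, hk⟩

lemma bitLength_eq_of_bounds (n : Int) (m : Nat) (hm : 1 ≤ m)
    (hlo : 4 ^ (m - 1) ≤ n) (hhi : n < 4 ^ m) :
    (PySem.Int.bitLength n + 1) / 2 = m := by
  have hnpos : (0:Int) < n := lt_of_lt_of_le (by positivity) hlo
  have hn0 : n ≠ 0 := by omega
  have habs : n.natAbs < 2 ^ PySem.Int.bitLength n := PySem.Int.lt_two_pow_bitLength n
  have habs2 : 2 ^ (PySem.Int.bitLength n - 1) ≤ n.natAbs := PySem.Int.two_pow_bitLength_le n hn0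
  have hnat_lo : 2 ^ (2 * (m - 1)) ≤ n.natAbs := by
    have : ((4:Int) ^ (m-1)) = ((2 ^ (2 * (m-1)) : Nat) : Int) := by
      push_cast; rw [pow_mul]; norm_num
    omega
  have hnat_hi : n.natAbs < 2 ^ (2 * m) := by
    have : ((4:Int) ^ m) = ((2 ^ (2 * m) : Nat) : Int) := by
      push_cast; rw [pow_mul]; norm_num
    omega
  have hbl_hi : PySem.Int.bitLength n ≤ 2 * m := by
    by_contra hc
    have h1 : 2 * m ≤ PySem.Int.bitLength n - 1 := by omega
    have := Nat.pow_le_pow_right (show 1 ≤ 2 by norm_num) h1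
    omega
  have hbl_lo : 2 * (m - 1) < PySem.Int.bitLength n := by
    by_contra hc
    have := Nat.pow_le_pow_right (show 1 ≤ 2 by norm_num) (not_lt.mp hc)
    omega
  omega

lemma floordiv_Scum (m : Nat) :
    PySem.Int.floordiv (8 * (4 ^ (m - 1) - 1)) 3 = Scum (m - 1) := by
  rw [PySem.Int.floordiv_eq_iff_of_pos (by norm_num)]
  have h3 := three_Scum (m - 1)
  omega

theorem solution_eq (N : Int) : solution N = solution_alt N := by
  unfold solution solution_alt
  by_cases h1 : N = 1
  · simp [h1, playersGet]
  · simp only [h1, if_false, Bool.not_true]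
    set M := N - 1 with hM
    by_cases h0 : M ≤ 0
    · rw [loopA]
      have hle : M - 4 ^ 1 ≤ 0 := by norm_num; omega
      rw [if_pos h0, dif_pos hle]
      simp [playersGet]
    · simp only [h0, if_false]
      rw [not_le] at h0
      -- find the level m
      have hex : ∃ m, 1 ≤ m ∧ Scum (m - 1) < M ∧ M ≤ Scum m := by
        refine Scum_exists M.toNat M h0 ?_
        have := le_Scum_self M.toNat
        omega
      obtain ⟨m, hm1, hlo, hhi⟩ := hex
      -- A-side value
      have hA : loopA M 1 false = if M - Scum (m - 1) ≤ 4 ^ m then "Alice" else "Bob" := by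
        rw [loopA_skip (m - 1) M hlo]
        have hmm : m - 1 + 1 = m := by omega
        rw [hmm]
        refine loopA_base m (M - Scum (m - 1)) (by omega) ?_
        have : Scum m = Scum (m - 1) + 2 * 4 ^ m := by
          conv_lhs => rw [show m = (m - 1) + 1 by omega]
          simp [Scum, hmm]
        omega
      rw [hA]
      -- B computes the same m
      set x := PySem.Int.floordiv (3 * M + 15) 8 with hx
      have hxb : x * 8 ≤ 3 * M + 15 ∧ 3 * M + 15 < (x + 1) * 8 :=
        (PySem.Int.floordiv_eq_iff_of_pos (by norm_num)).mp hx.symm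
      have h3lo := three_Scum (m - 1)
      have h3hi := three_Scum m
      have hpm : (4:Int) ^ m = 4 * 4 ^ (m - 1) := by
        conv_lhs => rw [show m = (m - 1) + 1 by omega]
        ring
      -- Scum (m-1) < M gives 4^(m-1) < x ; M ≤ Scum m gives x ≤ 4^m
      have hx_lo : 4 ^ (m - 1) < x := by omega
      have hx_hi : x ≤ 4 ^ m := by omega
      have hm_eq : (PySem.Int.bitLength (x - 1) + 1) / 2 = m := by
        refine bitLength_eq_of_bounds (x - 1) m hm1 (by omega) (by omega)
      rw [hm_eq, floordiv_Scum]
      by_cases hc : M - Scum (m - 1) ≤ 4 ^ m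
      · rw [if_pos hc, if_pos (by omega)]
      · rw [if_neg hc, if_neg (by omega)]

-- ===== VERDICT (by name: the statement is the Claim_ definition above) =====
theorem solution_spec : Claim_equal_solution := by
  intro N _
  unfold Spec_solution
  exact solution_eq N
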